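-- pv_equiv track=rewrite | github.com/JGBurgess1/Genomics_Programs | Python_for_Genomic_Data_Science/Exam_1.py | get_longest_orf_in_file
-- ===== SOURCE A (Python) =====
-- def get_longest_orf_in_file(seq_dict):
--     max_length = 0
--     max_length_seq_id = ""
--     max_length_orf_key = ""
--     for key in seq_dict:
--         if seq_dict[key] == {}:
--             pass
--         else:
--             for orf_key in seq_dict[key]:
--                 length = len(seq_dict[key][orf_key])
--                 if length > max_length:
--                     max_length_seq_id = key
--                     max_length = length
--                     max_length_orf_key = orf_key
--     return max_length_seq_id, max_length_orf_key, max_length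
-- ===== SOURCE B (Python) =====
-- def get_longest_orf_in_file(seq_dict):
--     # Rank all (seq_id, orf_key, length) triples by length, longest first.
--     # Python's sort is stable, so the first-encountered ORF wins ties,
--     # matching the strict ">" update of the original running-max loop.
--     ranked = sorted(
--         ((seq_id, orf_key, len(orf))
--          for seq_id, orfs in seq_dict.items()
--          for orf_key, orf in orfs.items()),
--         key=lambda t: t[2], reverse=True)
--     if ranked and ranked[0][2] > 0:
--         return ranked[0]
--     return "", "", 0
-- ===== Notes on version B (the rewrite author's own statement) =====
-- stated objective: alternative
-- what changed: Replaces the one-pass running-max over the nested dict (three mutable tracking variables updated under a strict '>') by a stable descending sort of all flattened (seq_id, orf_key, length) triples followed by picking the head (guarded by length > 0 for the sentinel); sort stability preserves the first-encountered tie-break.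
import Mathlib
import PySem

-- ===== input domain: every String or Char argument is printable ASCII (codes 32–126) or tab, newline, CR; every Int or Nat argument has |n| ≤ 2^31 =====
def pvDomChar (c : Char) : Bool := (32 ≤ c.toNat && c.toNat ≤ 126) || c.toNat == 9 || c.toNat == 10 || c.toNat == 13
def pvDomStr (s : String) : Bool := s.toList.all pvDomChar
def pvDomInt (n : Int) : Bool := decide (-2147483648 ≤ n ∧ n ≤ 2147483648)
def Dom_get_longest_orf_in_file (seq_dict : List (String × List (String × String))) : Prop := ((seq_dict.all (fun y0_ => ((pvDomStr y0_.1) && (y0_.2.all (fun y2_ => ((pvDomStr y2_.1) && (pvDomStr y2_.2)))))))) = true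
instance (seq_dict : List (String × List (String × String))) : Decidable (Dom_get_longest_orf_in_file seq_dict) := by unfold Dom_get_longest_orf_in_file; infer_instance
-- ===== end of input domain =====

-- B replaces A's nested running-max loop (three mutable tracking variables updated under a
-- strict ">") by a stable descending sort of all (seq_id, orf_key, length) triples followed
-- by picking the head; same result, different algorithm (sort-then-pick vs one-pass max).

-- ===== PORT A =====
-- state is the triple (max_length_seq_id, max_length_orf_key, max_length), returned as is;
-- 'for key in d' with the lookups 'd[key]' is iteration over the association pairs
def get_longest_orf_in_file (seq_dict : List (String × List (String × String))) : String × String × Int :=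
  seq_dict.foldl
    (fun st p =>
      if p.2 = [] then st
      else p.2.foldl
        (fun st q =>
          if st.2.2 < PySem.Str.len q.2 then (p.1, q.1, PySem.Str.len q.2) else st)
        st)
    ("", "", 0)

-- ===== PORT B =====
def get_longest_orf_in_file_alt (seq_dict : List (String × List (String × String))) : String × String × Int :=
  let ranked := PySem.List.sorted
    (seq_dict.flatMap (fun p => p.2.map (fun q => ((p.1, q.1, PySem.Str.len q.2) : String × String × Int))))
    (fun t => t.2.2) true
  match ranked with
  | [] => ("", "", 0)
  | t :: _ => if 0 < t.2.2 then t else ("", "", 0)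

-- ===== PRECONDITION & SPEC =====
def Spec_get_longest_orf_in_file (seq_dict : List (String × List (String × String))) (out : String × String × Int) : Prop := out = get_longest_orf_in_file_alt seq_dict
instance (seq_dict : List (String × List (String × String))) (out : String × String × Int) : Decidable (Spec_get_longest_orf_in_file seq_dict out) := by unfold Spec_get_longest_orf_in_file; infer_instance

-- ===== CLAIM (what is proved, stated in full; the proofs are below) =====
def Claim_equal_get_longest_orf_in_file : Prop := ∀ (seq_dict : List (String × List (String × String))), Dom_get_longest_orf_in_file seq_dict → Spec_get_longest_orf_in_file seq_dict (get_longest_orf_in_file seq_dict)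

-- ===== LEMMAS AND PROOFS =====

-- A's running-max step and fold, named for the proofs
def pvStep (st c : String × String × Int) : String × String × Int :=
  if st.2.2 < c.2.2 then c else st

def pvF (L : List (String × String × Int)) (st : String × String × Int) : String × String × Int :=
  L.foldl pvStep st

-- A's nested loop is the running max over the flattened candidate list
theorem foldl_flatMap_pvStep (xs : List (String × List (String × String))) :
    ∀ st : String × String × Int,
      xs.foldl
        (fun st p =>
          if p.2 = [] then st
          else p.2.foldl
            (fun st q =>
              if st.2.2 < PySem.Str.len q.2 then (p.1, q.1, PySem.Str.len q.2) else st)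
            st)
        st
      = pvF (xs.flatMap
          (fun p => p.2.map (fun q => ((p.1, q.1, PySem.Str.len q.2) : String × String × Int)))) st := by
  induction xs with
  | nil => intro st; rfl
  | cons p t ih =>
    intro st
    have hinner :
        p.2.foldl
          (fun st q =>
            if st.2.2 < PySem.Str.len q.2 then (p.1, q.1, PySem.Str.len q.2) else st)
          st
        = (p.2.map (fun q => ((p.1, q.1, PySem.Str.len q.2) : String × String × Int))).foldl pvStep st := by
      rw [List.foldl_map]; rfl
    rw [List.foldl_cons, List.flatMap_cons]
    unfold pvF
    rw [List.foldl_append]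
    by_cases hp : p.2 = []
    · rw [if_pos hp, ih, hp, List.map_nil]; rfl
    · rw [if_neg hp, hinner, ih]; rfl

-- the key never decreases along the fold
theorem pvF_key_mono (L : List (String × String × Int)) :
    ∀ st : String × String × Int, st.2.2 ≤ (pvF L st).2.2 := by
  induction L with
  | nil => intro st; exact le_refl _
  | cons c t ih =>
    intro st
    unfold pvF at *
    rw [List.foldl_cons]
    unfold pvStep
    split_ifs with h
    · exact le_trans (le_of_lt h) (ih c)
    · exact ih st

-- if the key did not strictly increase, no replacement ever happened
theorem pvF_eq_of_key_le (L : List (String × String × Int)) :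
    ∀ st : String × String × Int, (pvF L st).2.2 ≤ st.2.2 → pvF L st = st := by
  induction L with
  | nil => intro st _; rfl
  | cons c t ih =>
    intro st h
    unfold pvF at *
    rw [List.foldl_cons] at h ⊢
    unfold pvStep at h ⊢
    split_ifs with hc
    · rw [if_pos hc] at h
      exact absurd (le_trans (pvF_key_mono t c) h) (not_le.mpr hc)
    · rw [if_neg hc] at h
      exact ih st h

-- two starts with equal keys: the folds either meet or both never move
theorem pvF_eq_or_fixed (L : List (String × String × Int)) :
    ∀ a b : String × String × Int, a.2.2 = b.2.2 →
      pvF L a = pvF L b ∨ (pvF L a = a ∧ pvF L b = b) := by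
  induction L with
  | nil => intro a b _; exact Or.inr ⟨rfl, rfl⟩
  | cons c t ih =>
    intro a b hk
    unfold pvF
    rw [List.foldl_cons, List.foldl_cons]
    unfold pvStep
    by_cases hc : a.2.2 < c.2.2
    · rw [if_pos hc, if_pos (hk ▸ hc)]
      exact Or.inl rfl
    · rw [if_neg hc, if_neg (hk ▸ hc)]
      exact ih a b hk

-- head of a stable descending insertion: A's running-max step on the head
theorem foldl_insertBy_head (L : List (String × String × Int)) :
    ∀ (x : String × String × Int) (rest : List (String × String × Int)),
      ∃ rest', L.foldl
        (fun acc c => PySem.List.insertBy (fun a b => decide (b.2.2 < a.2.2)) c acc)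
        (x :: rest) = pvF L x :: rest' := by
  induction L with
  | nil => intro x rest; exact ⟨rest, rfl⟩
  | cons c t ih =>
    intro x rest
    rw [List.foldl_cons]
    show ∃ rest', t.foldl _
        (if (x.2.2 < c.2.2 : Bool) then c :: x :: rest
         else x :: PySem.List.insertBy (fun a b => decide (b.2.2 < a.2.2)) c rest) = _
    by_cases hc : x.2.2 < c.2.2
    · simp only [hc, decide_true, if_true]
      obtain ⟨r', hr⟩ := ih c (x :: rest)
      refine ⟨r', ?_⟩
      rw [hr]
      unfold pvF
      rw [List.foldl_cons]
      unfold pvStep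
      rw [if_pos hc]
    · simp only [hc, decide_false, Bool.false_eq_true, if_false]
      obtain ⟨r', hr⟩ := ih x _
      refine ⟨r', ?_⟩
      rw [hr]
      unfold pvF
      rw [List.foldl_cons]
      unfold pvStep
      rw [if_neg hc]

-- all candidate keys are string lengths, hence nonnegative
theorem cand_key_nonneg (xs : List (String × List (String × String)))
    (c : String × String × Int)
    (hc : c ∈ xs.flatMap (fun p => p.2.map (fun q => ((p.1, q.1, PySem.Str.len q.2) : String × String × Int)))) :
    0 ≤ c.2.2 := by
  simp only [List.mem_flatMap, List.mem_map] at hc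
  obtain ⟨p, _, q, _, rfl⟩ := hc
  simp [PySem.Str.len_eq]

-- ===== VERDICT (by name: the statement is the Claim_ definition above) =====
theorem get_longest_orf_in_file_spec : Claim_equal_get_longest_orf_in_file := by
  intro seq_dict _
  show get_longest_orf_in_file seq_dict = get_longest_orf_in_file_alt seq_dict
  simp only [get_longest_orf_in_file, get_longest_orf_in_file_alt]
  rw [foldl_flatMap_pvStep, PySem.List.sorted_rev_eq_foldl_insertBy]
  set cand := seq_dict.flatMap
    (fun p => p.2.map (fun q => ((p.1, q.1, PySem.Str.len q.2) : String × String × Int))) with hcand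
  cases hL : cand with
  | nil => rfl
  | cons c t =>
    have hc0 : (0:Int) ≤ c.2.2 := cand_key_nonneg seq_dict c (by show c ∈ cand; rw [hL]; exact List.mem_cons_self)
    rw [List.foldl_cons]
    obtain ⟨r', hr⟩ := foldl_insertBy_head t c []
    show pvF t (pvStep ("", "", 0) c) = _
    rw [show PySem.List.insertBy (fun a b => decide (b.2.2 < a.2.2)) c ([] : List (String × String × Int)) = [c] from rfl, hr]
    by_cases hcpos : (0:Int) < c.2.2
    · have hstep : pvStep (("", "", 0) : String × String × Int) c = c := by
        unfold pvStep; rw [if_pos hcpos]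
      rw [hstep]
      have : (0:Int) < (pvF t c).2.2 := lt_of_lt_of_le hcpos (pvF_key_mono t c)
      simp only [this, if_pos]
    · -- c has key 0, same as the sentinel
      have hceq : c.2.2 = (0:Int) := le_antisymm (not_lt.mp hcpos) hc0
      have hstep : pvStep (("", "", 0) : String × String × Int) c = ("", "", 0) := by
        unfold pvStep
        rw [if_neg (by simp [hceq])]
      rw [hstep]
      rcases pvF_eq_or_fixed t (("", "", 0) : String × String × Int) c (by simp [hceq]) with h | ⟨h1, h2⟩
      · rw [← h]
        by_cases hp : (0:Int) < (pvF t (("", "", 0) : String × String × Int)).2.2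
        · simp only [hp, if_pos]
        · have := pvF_eq_of_key_le t (("", "", 0) : String × String × Int) (by simpa using not_lt.mp hp)
          rw [this]
          simp
      · rw [h1, h2]
        simp [hceq]
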